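-- pv_equiv track=rewrite | github.com/denovochem/name_to_smiles | placeholder_name/name_manipulation/name_correction.py | _positions_overlap
-- ===== SOURCE A (Python) =====
-- from typing import ClassVar, Dict, FrozenSet, List, Optional, Protocol, Tuple, Union
--
-- def _positions_overlap(
--     points: List[Tuple[int, str, List[str]]]
-- ) -> bool:
--     """Check if any substitution positions overlap."""
--     ranges = [(p[0], p[0] + len(p[1])) for p in points]
--     ranges.sort()
--
--     for i in range(len(ranges) - 1):
--         if ranges[i][1] > ranges[i + 1][0]:
--             return True
--     return False
-- ===== SOURCE B (Python) =====
-- def _positions_overlap(points):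
--     """Check if any substitution positions overlap."""
--     intervals = [(p[0], p[0] + len(p[1])) for p in points]
--     seen = []
--     for s, e in intervals:
--         for s2, e2 in seen:
--             if s < e2 and s2 < e:
--                 return True
--         seen.append((s, e))
--     return False
-- ===== Notes on version B (the rewrite author's own statement) =====
-- stated objective: alternative
-- what changed: Replaces sort-then-adjacent-endpoint-comparison with a sort-free one-pass scan that tests each interval for symmetric half-open overlap against the intervals already seen.
import Mathlib
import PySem

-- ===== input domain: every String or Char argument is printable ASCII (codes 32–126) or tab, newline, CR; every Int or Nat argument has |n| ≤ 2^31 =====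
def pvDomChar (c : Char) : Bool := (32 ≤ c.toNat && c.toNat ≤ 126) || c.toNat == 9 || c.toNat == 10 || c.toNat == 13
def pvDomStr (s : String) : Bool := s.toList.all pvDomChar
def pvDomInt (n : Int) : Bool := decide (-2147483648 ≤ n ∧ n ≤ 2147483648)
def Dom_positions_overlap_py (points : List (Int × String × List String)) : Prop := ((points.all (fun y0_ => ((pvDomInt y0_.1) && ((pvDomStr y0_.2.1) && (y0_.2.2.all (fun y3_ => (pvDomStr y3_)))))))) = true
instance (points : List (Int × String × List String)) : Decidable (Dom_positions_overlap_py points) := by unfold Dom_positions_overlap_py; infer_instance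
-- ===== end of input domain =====

-- B replaces sort + adjacent-endpoint comparison by a sort-free scan testing each
-- interval for symmetric half-open overlap against the intervals already seen
-- (objective: alternative algorithm of similar size; not faster).

-- ===== PORT A =====
-- the 'for i in range(len(ranges)-1): if ranges[i][1] > ranges[i+1][0]: return True' loop,
-- as the obvious recursion over adjacent elements of the sorted list
def pvAdjCheck : List (Int × Int) → Bool
  | a :: b :: rest => if a.2 > b.1 then true else pvAdjCheck (b :: rest)
  | _ => false

def positions_overlap_py (points : List (Int × String × List String)) : Bool :=
  pvAdjCheck (PySem.List.sorted2
    (points.map (fun p => (p.1, p.1 + PySem.Str.len p.2.1))) Prod.fst Prod.snd)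

-- ===== PORT B =====
-- outer loop carrying the 'seen' list; the inner 'for … in seen: if …: return True' is .any
def pvScan : List (Int × Int) → List (Int × Int) → Bool
  | _, [] => false
  | seen, c :: rest =>
      if seen.any (fun q => decide (c.1 < q.2) && decide (q.1 < c.2)) then true
      else pvScan (seen ++ [c]) rest

def positions_overlap_py_alt (points : List (Int × String × List String)) : Bool :=
  pvScan [] (points.map (fun p => (p.1, p.1 + PySem.Str.len p.2.1)))

-- ===== PRECONDITION & SPEC =====
def Spec_positions_overlap_py (points : List (Int × String × List String)) (out : Bool) : Prop := out = positions_overlap_py_alt points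
instance (points : List (Int × String × List String)) (out : Bool) : Decidable (Spec_positions_overlap_py points out) := by unfold Spec_positions_overlap_py; infer_instance

-- ===== CLAIM (what is proved, stated in full; the proofs are below) =====
def Claim_equal_positions_overlap_py : Prop := ∀ (points : List (Int × String × List String)), Dom_positions_overlap_py points → Spec_positions_overlap_py points (positions_overlap_py points)

-- ===== LEMMAS AND PROOFS =====

-- symmetric half-open overlap, and its negation
def pvO (a b : Int × Int) : Prop := a.1 < b.2 ∧ b.1 < a.2
def pvN (a b : Int × Int) : Prop := ¬ pvO a b
-- lexicographic ≤ on pairs (Python tuple order)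
def pvLexLe (a b : Int × Int) : Prop := a.1 < b.1 ∨ (a.1 = b.1 ∧ a.2 ≤ b.2)
-- separation relation checked by A's adjacent scan
def pvR (a b : Int × Int) : Prop := a.2 ≤ b.1
-- the chain of adjacent separations that makes A return False
def pvSep : List (Int × Int) → Prop
  | a :: b :: rest => pvR a b ∧ pvSep (b :: rest)
  | _ => True

theorem pvN_symm : Symmetric pvN := by
  intro a b h hc; exact h ⟨hc.2, hc.1⟩

theorem pvScan_iff (rest seen : List (Int × Int)) (hs : seen.Pairwise pvN) :
    pvScan seen rest = true ↔ ¬ (seen ++ rest).Pairwise pvN := by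
  induction rest generalizing seen with
  | nil => simp [pvScan, hs]
  | cons c rest ih =>
    by_cases hany : seen.any (fun q => decide (c.1 < q.2) && decide (q.1 < c.2)) = true
    · simp only [pvScan, hany, if_pos]
      obtain ⟨q, hq, hqc⟩ := List.any_eq_true.mp hany
      simp only [Bool.and_eq_true, decide_eq_true_eq] at hqc
      constructor
      · intro _ hp
        have := (List.pairwise_append.mp hp).2.2 q hq c (by simp)
        exact this ⟨hqc.2, hqc.1⟩
      · intro _; trivial
    · simp only [pvScan, hany, if_neg, Bool.false_eq_true, not_false_iff]
      have hcross : ∀ q ∈ seen, pvN q c := by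
        intro q hq hc
        exact hany (List.any_eq_true.mpr ⟨q, hq, by
          simp only [Bool.and_eq_true, decide_eq_true_eq]; exact ⟨hc.2, hc.1⟩⟩)
      have hs' : (seen ++ [c]).Pairwise pvN := by
        rw [List.pairwise_append]
        exact ⟨hs, List.pairwise_singleton _ _, by
          intro q hq x hx; rw [List.mem_singleton] at hx; subst hx; exact hcross q hq⟩
      have := ih (seen ++ [c]) hs'
      rw [this, List.append_assoc]
      exact Iff.rfl

theorem pvAdjCheck_false_iff (l : List (Int × Int)) :
    pvAdjCheck l = false ↔ pvSep l := by
  match l with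
  | [] => simp [pvAdjCheck, pvSep]
  | [a] => simp [pvAdjCheck, pvSep]
  | a :: b :: rest =>
    by_cases h : a.2 > b.1
    · simp [pvAdjCheck, pvSep, h, pvR]
    · simp only [pvAdjCheck, h, if_neg, not_false_iff, pvSep]
      rw [pvAdjCheck_false_iff (b :: rest)]
      unfold pvR
      constructor
      · intro hr; exact ⟨by omega, hr⟩
      · intro hr; exact hr.2

theorem pvSep_head (a : Int × Int) (l : List (Int × Int))
    (hv : ∀ x ∈ l, x.1 ≤ x.2) (hc : pvSep (a :: l)) :
    ∀ b ∈ l, pvR a b := by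
  induction l generalizing a with
  | nil => intro b hb; cases hb
  | cons c l ih =>
    unfold pvSep at hc
    intro b hb
    rcases List.mem_cons.mp hb with h | h
    · subst h; exact hc.1
    · have hcb := ih c (fun x hx => hv x (List.mem_cons_of_mem _ hx)) hc.2 b h
      have hcv : c.1 ≤ c.2 := hv c (List.mem_cons_self ..)
      have h1 := hc.1
      unfold pvR at *
      omega

theorem pvSep_iff_pairwise (l : List (Int × Int)) (hv : ∀ x ∈ l, x.1 ≤ x.2) :
    pvSep l ↔ l.Pairwise pvR := by
  induction l with
  | nil => simp [pvSep]
  | cons a l ih =>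
    have hv' : ∀ x ∈ l, x.1 ≤ x.2 := fun x hx => hv x (List.mem_cons_of_mem _ hx)
    constructor
    · intro hc
      rw [List.pairwise_cons]
      refine ⟨pvSep_head a l hv' hc, ?_⟩
      refine (ih hv').mp ?_
      cases l with
      | nil => trivial
      | cons b rest => exact hc.2
    · intro hp
      rw [List.pairwise_cons] at hp
      cases l with
      | nil => trivial
      | cons b rest =>
        exact ⟨hp.1 b (List.mem_cons_self ..), (ih hv').mpr hp.2⟩

-- on a lex-sorted pair of valid intervals, separation and non-overlap coincide
theorem pvR_iff_N (a b : Int × Int) (hvb : b.1 ≤ b.2)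
    (hlex : pvLexLe a b) : pvR a b ↔ pvN a b := by
  unfold pvR pvN pvO pvLexLe at *
  constructor
  · intro h hc; omega
  · intro h; by_contra hc; exact h (by omega)

theorem pvInsertBy_mem {α : Type} (bef : α → α → Bool) (x : α) (l : List α) (y : α) :
    y ∈ PySem.List.insertBy bef x l → y = x ∨ y ∈ l := by
  induction l with
  | nil => simp [PySem.List.insertBy]
  | cons a l ih =>
    simp only [PySem.List.insertBy]
    split_ifs with h
    · intro hy; rcases List.mem_cons.mp hy with h' | h'
      · exact Or.inl h'
      · exact Or.inr h'
    · intro hy; rcases List.mem_cons.mp hy with h' | h'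
      · exact Or.inr (by simp [h'])
      · rcases ih h' with h'' | h''
        · exact Or.inl h''
        · exact Or.inr (List.mem_cons_of_mem _ h'')

theorem pvInsertBy_pairwise {α : Type} (R : α → α → Prop) (bef : α → α → Bool)
    (h1 : ∀ a b, bef a b = true → R a b) (h2 : ∀ a b, bef a b = false → R b a)
    (htr : ∀ a b c, R a b → R b c → R a c) (x : α) (l : List α) (hl : l.Pairwise R) :
    (PySem.List.insertBy bef x l).Pairwise R := by
  induction l with
  | nil => simp [PySem.List.insertBy]
  | cons a l ih =>
    rw [List.pairwise_cons] at hl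
    simp only [PySem.List.insertBy]
    split_ifs with h
    · rw [List.pairwise_cons]
      refine ⟨?_, List.pairwise_cons.mpr hl⟩
      intro b hb
      rcases List.mem_cons.mp hb with h' | h'
      · subst h'; exact h1 _ _ h
      · exact htr _ _ _ (h1 _ _ h) (hl.1 b h')
    · rw [List.pairwise_cons]
      refine ⟨?_, ih hl.2⟩
      intro b hb
      rcases pvInsertBy_mem bef x l b hb with h' | h'
      · subst h'; exact h2 _ _ (by simpa using h)
      · exact hl.1 b h'

theorem pvFoldl_insertBy_pairwise {α : Type} (R : α → α → Prop) (bef : α → α → Bool)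
    (h1 : ∀ a b, bef a b = true → R a b) (h2 : ∀ a b, bef a b = false → R b a)
    (htr : ∀ a b c, R a b → R b c → R a c) (xs acc : List α) (hacc : acc.Pairwise R) :
    (xs.foldl (fun acc x => PySem.List.insertBy bef x acc) acc).Pairwise R := by
  induction xs generalizing acc with
  | nil => exact hacc
  | cons x xs ih =>
    exact ih _ (pvInsertBy_pairwise R bef h1 h2 htr x acc hacc)

theorem pvSorted2_pairwise (xs : List (Int × Int)) :
    (PySem.List.sorted2 xs Prod.fst Prod.snd).Pairwise pvLexLe := by
  show (xs.foldl (fun acc x => PySem.List.insertBy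
      (fun a b => decide (a.1 < b.1) || !decide (b.1 < a.1) && decide (a.2 < b.2)) x acc)
      []).Pairwise pvLexLe
  apply pvFoldl_insertBy_pairwise pvLexLe
  · intro a b h
    simp only [Bool.or_eq_true, Bool.and_eq_true, Bool.not_eq_true', decide_eq_true_eq,
      decide_eq_false_iff_not] at h
    unfold pvLexLe
    omega
  · intro a b h
    simp only [Bool.or_eq_false_iff, Bool.and_eq_false_iff, Bool.not_eq_false',
      decide_eq_false_iff_not, decide_eq_true_eq] at h
    unfold pvLexLe
    omega
  · intro a b c hab hbc
    unfold pvLexLe at *; omega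
  · exact List.Pairwise.nil

-- ===== VERDICT (by name: the statement is the Claim_ definition above) =====
theorem positions_overlap_py_spec : Claim_equal_positions_overlap_py := by
  intro points _
  unfold Spec_positions_overlap_py positions_overlap_py positions_overlap_py_alt
  set ivs : List (Int × Int) := points.map (fun p => (p.1, p.1 + PySem.Str.len p.2.1)) with hivs
  set s : List (Int × Int) := PySem.List.sorted2 ivs Prod.fst Prod.snd with hs
  have hperm : s.Perm ivs := PySem.List.sorted2_perm ivs Prod.fst Prod.snd false
  have hvIvs : ∀ x ∈ ivs, x.1 ≤ x.2 := by
    intro x hx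
    rw [hivs, List.mem_map] at hx
    obtain ⟨p, _, hp⟩ := hx
    subst hp
    simp only [PySem.Str.len]
    omega
  have hvS : ∀ x ∈ s, x.1 ≤ x.2 := fun x hx => hvIvs x (hperm.mem_iff.mp hx)
  have hsort : s.Pairwise pvLexLe := pvSorted2_pairwise ivs
  rw [Bool.eq_iff_iff]
  have hA : pvAdjCheck s = true ↔ ¬ s.Pairwise pvN := by
    rw [← Bool.not_eq_false, not_iff_not, pvAdjCheck_false_iff, pvSep_iff_pairwise s hvS]
    constructor
    · intro h
      exact ((hsort.and h).imp_of_mem (fun {a b} ha hb hab =>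
        (pvR_iff_N a b (hvS b hb) hab.1).mp hab.2))
    · intro h
      exact ((hsort.and h).imp_of_mem (fun {a b} ha hb hab =>
        (pvR_iff_N a b (hvS b hb) hab.1).mpr hab.2))
  have hB : pvScan [] ivs = true ↔ ¬ ivs.Pairwise pvN := by
    simpa using pvScan_iff ivs [] List.Pairwise.nil
  rw [hA, hB]
  exact not_congr (hperm.pairwise_iff (fun {a b} hab => pvN_symm hab))
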